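-- pv_equiv track=rewrite | github.com/dun933/text_recognition | ss/detector/utils/run_util.py | character_check
-- ===== SOURCE A (Python) =====
-- def character_check(list_, bx, by, bx2, by2):
--     chs = [ch for ch in list_ if (ch[0] > bx) & (ch[1] > by) & (ch[2] < bx2) & (ch[3] < by2)]
--     upper = 0;
--     lower = 0
--     for f in chs:
--         if f[4].isupper():
--             upper += 1
--         elif f[4].islower():
--             lower += 1
--     return upper, lower
-- ===== SOURCE B (Python) =====
-- def character_check(list_, bx, by, bx2, by2):
--     # Divide and conquer: classify a single entry to a (0/1, 0/1) count vector,
--     # split the list at the midpoint, recurse on both halves and add the vectors.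
--     def classify(ch):
--         if ch[0] > bx and ch[1] > by and ch[2] < bx2 and ch[3] < by2:
--             if ch[4].isupper():
--                 return (1, 0)
--             if ch[4].islower():
--                 return (0, 1)
--         return (0, 0)
--
--     def solve(xs):
--         if len(xs) <= 1:
--             return classify(xs[0]) if xs else (0, 0)
--         mid = len(xs) // 2
--         u1, l1 = solve(xs[:mid])
--         u2, l2 = solve(xs[mid:])
--         return (u1 + u2, l1 + l2)
--
--     return solve(list_)
-- ===== Notes on version B (the rewrite author's own statement) =====
-- stated objective: alternative
-- what changed: Replaces the linear filter-then-fold over a shared (upper, lower) accumulator with a divide-and-conquer recursion: each entry is classified to a (0/1, 0/1) count vector, the list is split at the midpoint and the two halves' vectors are summed.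
import Mathlib
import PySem

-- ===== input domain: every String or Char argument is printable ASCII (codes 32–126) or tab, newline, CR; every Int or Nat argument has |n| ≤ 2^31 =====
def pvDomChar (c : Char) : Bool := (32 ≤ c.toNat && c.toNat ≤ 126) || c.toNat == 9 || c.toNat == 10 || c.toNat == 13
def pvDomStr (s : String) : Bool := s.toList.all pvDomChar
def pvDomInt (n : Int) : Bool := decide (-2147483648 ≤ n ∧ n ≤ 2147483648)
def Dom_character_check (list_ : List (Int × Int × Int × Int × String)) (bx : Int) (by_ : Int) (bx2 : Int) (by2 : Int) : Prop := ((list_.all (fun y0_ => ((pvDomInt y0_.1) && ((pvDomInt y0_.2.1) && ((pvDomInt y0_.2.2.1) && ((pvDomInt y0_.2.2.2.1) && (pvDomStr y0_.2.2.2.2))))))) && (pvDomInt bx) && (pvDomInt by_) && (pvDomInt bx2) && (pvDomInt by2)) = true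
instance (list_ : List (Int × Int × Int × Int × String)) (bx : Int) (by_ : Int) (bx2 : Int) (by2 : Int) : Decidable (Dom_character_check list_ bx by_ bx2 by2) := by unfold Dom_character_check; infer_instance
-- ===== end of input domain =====

-- ===== PORT A =====
-- B differs from A by algorithmic structure: A filters into an intermediate list and
-- folds one shared (upper, lower) accumulator left-to-right; B is a divide-and-conquer
-- recursion that classifies singletons to (0/1, 0/1) vectors and sums the halves.
-- str.isupper()/str.islower() ported by hand (exact on the ASCII domain of Dom_):
-- at least one cased character and every cased character upper (resp. lower).
def pyStrIsupper (s : String) : Bool :=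
  s.toList.any PySem.Chars.isupper && s.toList.all (fun c => !PySem.Chars.islower c)

def pyStrIslower (s : String) : Bool :=
  s.toList.any PySem.Chars.islower && s.toList.all (fun c => !PySem.Chars.isupper c)

def character_check (list_ : List (Int × Int × Int × Int × String)) (bx : Int) (by_ : Int) (bx2 : Int) (by2 : Int) : Int × Int :=
  let chs := list_.filter (fun ch =>
    decide (ch.1 > bx) && decide (ch.2.1 > by_) && decide (ch.2.2.1 < bx2) && decide (ch.2.2.2.1 < by2))
  let st := chs.foldl (fun (st : Int × Int) f =>
    if pyStrIsupper f.2.2.2.2 then (st.1 + 1, st.2)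
    else if pyStrIslower f.2.2.2.2 then (st.1, st.2 + 1)
    else st) (0, 0)
  (st.1, st.2)

-- ===== PORT B =====
def ccClassify (bx by_ bx2 by2 : Int) (ch : Int × Int × Int × Int × String) : Int × Int :=
  if ch.1 > bx ∧ ch.2.1 > by_ ∧ ch.2.2.1 < bx2 ∧ ch.2.2.2.1 < by2 then
    if pyStrIsupper ch.2.2.2.2 then (1, 0)
    else if pyStrIslower ch.2.2.2.2 then (0, 1)
    else (0, 0)
  else (0, 0)

def ccSolve (bx by_ bx2 by2 : Int) (xs : List (Int × Int × Int × Int × String)) : Int × Int :=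
  if _h : xs.length ≤ 1 then
    match xs with
    | [] => (0, 0)
    | ch :: _ => ccClassify bx by_ bx2 by2 ch
  else
    let mid := xs.length / 2
    let a := ccSolve bx by_ bx2 by2 (xs.take mid)
    let b := ccSolve bx by_ bx2 by2 (xs.drop mid)
    (a.1 + b.1, a.2 + b.2)
termination_by xs.length
decreasing_by
  · simp only [List.length_take]; omega
  · simp only [List.length_drop]; omega

def character_check_alt (list_ : List (Int × Int × Int × Int × String)) (bx : Int) (by_ : Int) (bx2 : Int) (by2 : Int) : Int × Int :=
  ccSolve bx by_ bx2 by2 list_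

-- ===== PRECONDITION & SPEC =====
def Spec_character_check (list_ : List (Int × Int × Int × Int × String)) (bx : Int) (by_ : Int) (bx2 : Int) (by2 : Int) (out : Int × Int) : Prop := out = character_check_alt list_ bx by_ bx2 by2
instance (list_ : List (Int × Int × Int × Int × String)) (bx : Int) (by_ : Int) (bx2 : Int) (by2 : Int) (out : Int × Int) : Decidable (Spec_character_check list_ bx by_ bx2 by2 out) := by unfold Spec_character_check; infer_instance

-- ===== CLAIM (what is proved, stated in full; the proofs are below) =====
def Claim_equal_character_check : Prop := ∀ (list_ : List (Int × Int × Int × Int × String)) (bx : Int) (by_ : Int) (bx2 : Int) (by2 : Int), Dom_character_check list_ bx by_ bx2 by2 → Spec_character_check list_ bx by_ bx2 by2 (character_check list_ bx by_ bx2 by2)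

-- ===== LEMMAS AND PROOFS =====
lemma upper_not_lower (s : String) (h : pyStrIslower s = true) : pyStrIsupper s = false := by
  simp only [pyStrIslower, pyStrIsupper, Bool.and_eq_true, List.any_eq_true,
    List.all_eq_true, Bool.not_eq_true'] at *
  obtain ⟨⟨c, hc, hcl⟩, hall⟩ := h
  simp only [Bool.and_eq_false_iff, List.any_eq_false]
  left
  intro x hx
  simp [hall x hx]

-- the predicates both ports count
def ccPU (bx by_ bx2 by2 : Int) (ch : Int × Int × Int × Int × String) : Bool :=
  (decide (ch.1 > bx) && decide (ch.2.1 > by_) && decide (ch.2.2.1 < bx2) && decide (ch.2.2.2.1 < by2))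
    && pyStrIsupper ch.2.2.2.2

def ccPL (bx by_ bx2 by2 : Int) (ch : Int × Int × Int × Int × String) : Bool :=
  (decide (ch.1 > bx) && decide (ch.2.1 > by_) && decide (ch.2.2.1 < bx2) && decide (ch.2.2.2.1 < by2))
    && pyStrIslower ch.2.2.2.2

lemma classify_eq (bx by_ bx2 by2 : Int) (ch : Int × Int × Int × Int × String) :
    ccClassify bx by_ bx2 by2 ch =
      ((if ccPU bx by_ bx2 by2 ch then 1 else 0), (if ccPL bx by_ bx2 by2 ch then 1 else 0)) := by
  unfold ccClassify ccPU ccPL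
  by_cases hin : ch.1 > bx ∧ ch.2.1 > by_ ∧ ch.2.2.1 < bx2 ∧ ch.2.2.2.1 < by2
  · by_cases hu : pyStrIsupper ch.2.2.2.2 = true
    · have hl : pyStrIslower ch.2.2.2.2 = false := by
        by_contra h
        simp only [Bool.not_eq_false] at h
        exact absurd (upper_not_lower _ h) (by simp [hu])
      simp [hin.1, hin.2.1, hin.2.2.1, hin.2.2.2, hu, hl]
    · by_cases hl : pyStrIslower ch.2.2.2.2 = true <;>
        simp [hin.1, hin.2.1, hin.2.2.1, hin.2.2.2, hu, hl]
  · simp only [Bool.and_eq_true, decide_eq_true_eq] at *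
    have : ¬ (ch.1 > bx ∧ ch.2.1 > by_ ∧ ch.2.2.1 < bx2 ∧ ch.2.2.2.1 < by2) := hin
    split_ifs with h1 h2 h3 <;> simp_all

lemma solve_count (bx by_ bx2 by2 : Int) :
    ∀ (n : ℕ) (xs : List (Int × Int × Int × Int × String)), xs.length = n →
      ccSolve bx by_ bx2 by2 xs =
        ((xs.countP (ccPU bx by_ bx2 by2) : Int), (xs.countP (ccPL bx by_ bx2 by2) : Int)) := by
  intro n
  induction n using Nat.strong_induction_on with
  | _ n ih =>
    intro xs hlen
    rw [ccSolve]
    by_cases h : xs.length ≤ 1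
    · simp only [h, dite_true]
      match xs with
      | [] => simp
      | [ch] =>
        show ccClassify bx by_ bx2 by2 ch = _
        rw [classify_eq]
        by_cases hu : ccPU bx by_ bx2 by2 ch = true <;>
          by_cases hl : ccPL bx by_ bx2 by2 ch = true <;>
          simp [hu, hl]
      | a :: b :: rest => simp at h
    · simp only [h, dite_false]
      have h2 : 2 ≤ xs.length := by omega
      have htake := ih (xs.take (xs.length / 2)).length
        (by simp only [List.length_take]; omega) _ rfl
      have hdrop := ih (xs.drop (xs.length / 2)).length
        (by simp only [List.length_drop]; omega) _ rfl
      have hsplit : xs = xs.take (xs.length / 2) ++ xs.drop (xs.length / 2) :=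
        (List.take_append_drop _ _).symm
      simp only [htake, hdrop, Prod.mk.injEq]
      constructor <;>
      · conv_rhs => rw [hsplit]
        rw [List.countP_append]
        push_cast
        ring

lemma fold_count (l : List (Int × Int × Int × Int × String)) (a b : Int) :
    l.foldl (fun (st : Int × Int) f =>
      if pyStrIsupper f.2.2.2.2 then (st.1 + 1, st.2)
      else if pyStrIslower f.2.2.2.2 then (st.1, st.2 + 1)
      else st) (a, b)
    = (a + (l.countP (fun ch => pyStrIsupper ch.2.2.2.2) : Int),
       b + (l.countP (fun ch => pyStrIslower ch.2.2.2.2) : Int)) := by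
  induction l generalizing a b with
  | nil => simp
  | cons x xs ih =>
    simp only [List.foldl_cons, List.countP_cons]
    by_cases hu : pyStrIsupper x.2.2.2.2 = true
    · have hl : pyStrIslower x.2.2.2.2 = false := by
        by_contra h
        simp only [Bool.not_eq_false] at h
        exact absurd (upper_not_lower _ h) (by simp [hu])
      simp [hu, hl, ih]; omega
    · by_cases hl : pyStrIslower x.2.2.2.2 = true
      · simp [hu, hl, ih]; omega
      · simp [hu, hl, ih]

-- ===== VERDICT (by name: the statement is the Claim_ definition above) =====
theorem character_check_spec : Claim_equal_character_check := by
  intro list_ bx by_ bx2 by2 _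
  unfold Spec_character_check character_check character_check_alt
  rw [solve_count bx by_ bx2 by2 list_.length list_ rfl]
  simp only [fold_count, List.countP_filter, zero_add, Prod.mk.injEq]
  unfold ccPU ccPL
  constructor <;>
  · congr 1
    exact List.countP_congr fun ch _ => by rw [Bool.and_comm]
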